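-- pv_equiv track=rewrite | github.com/Arsen1302/Code-copy-detector | TestData/solutions/problem_1378_3.py | solution_1378_3
-- ===== SOURCE A (Python) =====
-- from typing import List
--
-- def solution_1378_3(grid: List[List[int]]) -> int:
--
--     # this is the simpler code but it doesn't work because of a time limit problem. simply having the prefix sum's already calculated makes this problem ultra efficient
--     res = float('inf') # max
--     length = len(grid[0])
--     for i in range(length): # check each index of the array
--         # take the sum of everything after the index on the top row and before the index on the bottom row
--         top = sum(grid[0][i+1:])
--         bot = sum(grid[1][:i])
--         current = max(top, bot) # max of robot 2's take if robot 1 were to turn at this specific index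
--         res = min(res, current) # determines robot 2's real take that would maximize robot 1's take
--     return res
-- ===== SOURCE B (Python) =====
-- from typing import List
--
-- def solution_1378_3(grid: List[List[int]]) -> int:
--     # One pass: keep a running suffix sum of row 0 and prefix sum of row 1.
--     row0, row1 = grid[0], grid[1]
--     top = sum(row0)
--     bot = 0
--     res = None
--     for i, x in enumerate(row0):
--         top -= x
--         cur = max(top, bot)
--         if res is None or cur < res:
--             res = cur
--         if i < len(row1):
--             bot += row1[i]
--     return res
-- ===== Notes on version B (the rewrite author's own statement) =====
-- stated objective: alternative
-- what changed: Instead of recomputing sum(grid[0][i+1:]) and sum(grid[1][:i]) from scratch at every split point, B keeps a running suffix sum of row 0 and prefix sum of row 1 and updates them in a single pass (intended as faster; measured only ~1.4x at the largest size).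
-- outside the precondition, e.g. on solution_1378_3([[], []]): A returns inf, B returns None
import Mathlib
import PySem

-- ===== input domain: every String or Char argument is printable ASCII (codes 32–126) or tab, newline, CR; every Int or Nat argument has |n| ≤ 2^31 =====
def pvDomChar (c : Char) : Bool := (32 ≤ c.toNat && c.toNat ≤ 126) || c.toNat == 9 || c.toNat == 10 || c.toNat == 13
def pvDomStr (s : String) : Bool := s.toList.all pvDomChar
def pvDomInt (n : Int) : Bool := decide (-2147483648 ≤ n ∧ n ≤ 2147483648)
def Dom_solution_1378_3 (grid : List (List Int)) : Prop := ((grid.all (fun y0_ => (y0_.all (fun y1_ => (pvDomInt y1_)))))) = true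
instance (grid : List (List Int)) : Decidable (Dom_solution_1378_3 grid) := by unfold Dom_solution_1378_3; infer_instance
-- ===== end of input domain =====

-- B replaces A's per-index slice sums by one running suffix/prefix sum pass over the rows (alternative single-pass algorithm).

-- ===== PORT A =====
def solution_1378_3 (grid : List (List Int)) : Int :=
  let row0 := (PySem.List.pyGet? grid 0).getD []
  let row1 := (PySem.List.pyGet? grid 1).getD []
  let length : Int := (row0.length : Int)
  let res : Option Int := (PySem.List.pyRange 0 length 1).foldl
    (fun res i =>
      let top := (PySem.List.slice row0 (some (i+1)) none).foldl (· + ·) 0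
      let bot := (PySem.List.slice row1 none (some i)).foldl (· + ·) 0
      let current := max top bot
      some (match res with
            | none => current          -- min(float('inf'), current) = current
            | some r => min r current)) none
  res.getD 0    -- Pre_ rules out length = 0, where Python returns float('inf')

-- ===== PORT B =====
def solution_1378_3_alt (grid : List (List Int)) : Int :=
  let row0 := (PySem.List.pyGet? grid 0).getD []
  let row1 := (PySem.List.pyGet? grid 1).getD []
  let st := (PySem.List.enumerate row0).foldl
    (fun (st : Int × Int × Option Int) p =>
      let top := st.1 - p.2
      let cur := max top st.2.1
      let res : Option Int :=
        match st.2.2 with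
        | none => some cur
        | some r => if cur < r then some cur else some r
      let bot := if p.1 < (row1.length : Int)
                 then st.2.1 + PySem.List.pyGetD row1 p.1 0   -- guard keeps the index in range
                 else st.2.1
      (top, bot, res))
    (row0.foldl (· + ·) 0, 0, none)
  st.2.2.getD 0    -- Pre_ rules out row0 = [], where Python returns None

-- ===== PRECONDITION & SPEC =====
-- Pre_ excludes grids with fewer than two rows (Python A raises IndexError) and grids whose
-- first row is empty (Python A returns float('inf'), not an int; B returns None).
def Pre_solution_1378_3 (grid : List (List Int)) : Prop :=
  2 ≤ grid.length ∧ grid.headI ≠ []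
instance (grid : List (List Int)) : Decidable (Pre_solution_1378_3 grid) := by
  unfold Pre_solution_1378_3; infer_instance
def pvWitness_solution_1378_3 : List (List Int) := [[1, 3, 1, 15], [1, 3, 3, 1]]

def Spec_solution_1378_3 (grid : List (List Int)) (out : Int) : Prop := out = solution_1378_3_alt grid
instance (grid : List (List Int)) (out : Int) : Decidable (Spec_solution_1378_3 grid out) := by unfold Spec_solution_1378_3; infer_instance

-- ===== CLAIM (what is proved, stated in full; the proofs are below) =====
def Claim_equal_solution_1378_3 : Prop := ∀ (grid : List (List Int)), Dom_solution_1378_3 grid → Pre_solution_1378_3 grid → Spec_solution_1378_3 grid (solution_1378_3 grid)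

-- ===== LEMMAS AND PROOFS =====

-- the common running-minimum step on Option Int
def pvOMin (r : Option Int) (v : Int) : Option Int :=
  some (match r with | none => v | some x => min x v)

lemma pvOMin_eq_alt (r : Option Int) (v : Int) :
    (match r with
     | none => some v
     | some x => if v < x then some v else some x) = pvOMin r v := by
  cases r with
  | none => rfl
  | some x =>
    simp only [pvOMin, min_def]
    split_ifs <;> simp_all
    omega

-- B's fold, characterised as a running minimum over the indices of the remaining suffix
lemma pvB_inv (row1 : List Int) (xs : List Int) : ∀ (s : Nat) (top bot : Int) (res : Option Int),
    ((PySem.List.enumerate xs ((s : Nat) : Int)).foldl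
      (fun (st : Int × Int × Option Int) p =>
        let top := st.1 - p.2
        let cur := max top st.2.1
        let res : Option Int :=
          match st.2.2 with
          | none => some cur
          | some r => if cur < r then some cur else some r
        let bot := if p.1 < (row1.length : Int)
                   then st.2.1 + PySem.List.pyGetD row1 p.1 0
                   else st.2.1
        (top, bot, res)) (top, bot, res)).2.2
    = (List.range xs.length).foldl
        (fun r j => pvOMin r (max (top - (xs.take (j+1)).sum) (bot + ((row1.drop s).take j).sum))) res := by
  induction xs with
  | nil => intro s top bot res; simp [PySem.List.enumerate_nil]
  | cons x t ih =>
    intro s top bot res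
    rw [PySem.List.enumerate_cons, List.foldl_cons]
    have hs : ((s : Int) + 1) = ((s + 1 : Nat) : Int) := by push_cast; ring
    rw [hs, ih (s+1)]
    rw [List.length_cons, List.range_succ_eq_map, List.foldl_cons, List.foldl_map]
    dsimp only
    -- align the two step functions and the two initial accumulators
    have hbot : (if ((s : Nat) : Int) < (row1.length : Int)
                 then bot + PySem.List.pyGetD row1 ((s : Nat) : Int) 0
                 else bot) = bot + ((row1.drop s).take 1).sum := by
      by_cases h : s < row1.length
      · rw [if_pos (by exact_mod_cast h), PySem.List.pyGetD_natCast]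
        have hd : row1.drop s = row1[s] :: row1.drop (s+1) := List.drop_eq_getElem_cons h
        rw [hd]
        have h1 : (List.take 1 (row1[s] :: List.drop (s+1) row1)) = [row1[s]] := rfl
        rw [h1]
        simp [List.getD_eq_getElem?_getD, List.getElem?_eq_getElem h]
      · rw [if_neg (by exact_mod_cast h)]
        rw [show row1.drop s = ([] : List Int) from List.drop_eq_nil_of_le (by omega)]
        simp
    have hres : (match res with
                 | none => some (max (top - x) bot)
                 | some r => if max (top - x) bot < r then some (max (top - x) bot) else some r)
                = pvOMin res (max (top - (List.take 1 (x :: t)).sum) (bot + ((row1.drop s).take 0).sum)) := by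
      rw [← pvOMin_eq_alt]; simp
    simp only [hbot, hres]
    apply PySem.List.foldl_congr_mem
    intro acc j _
    congr 2
    · have h1 : (x :: t).take (j + 1 + 1) = x :: t.take (j + 1) := rfl
      rw [h1]; simp [List.sum_cons]; ring
    · by_cases h : s < row1.length
      · have hd : row1.drop s = row1[s] :: row1.drop (s+1) := List.drop_eq_getElem_cons h
        rw [hd]
        have h1 : (List.take 1 (row1[s] :: List.drop (s+1) row1)) = [row1[s]] := rfl
        have h2 : ∀ j : Nat, (List.take (j+1) (row1[s] :: List.drop (s+1) row1))
                    = row1[s] :: List.take j (List.drop (s+1) row1) := fun _ => rfl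
        rw [h1, h2, List.sum_cons]
        simp; ring
      · rw [show row1.drop s = ([] : List Int) from List.drop_eq_nil_of_le (by omega),
            show row1.drop (s+1) = ([] : List Int) from List.drop_eq_nil_of_le (by omega)]
        simp

-- A's fold, rewritten to range/drop/take form
lemma pvA_eq (row0 row1 : List Int) :
    ((PySem.List.pyRange 0 (row0.length : Int) 1).foldl
      (fun res i =>
        let top := (PySem.List.slice row0 (some (i+1)) none).foldl (· + ·) 0
        let bot := (PySem.List.slice row1 none (some i)).foldl (· + ·) 0
        let current := max top bot
        some (match res with
              | none => current
              | some r => min r current)) none)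
    = (List.range row0.length).foldl
        (fun r k => pvOMin r (max ((row0.drop (k+1)).sum) ((row1.take k).sum))) none := by
  rw [PySem.List.pyRange_zero_nat, List.foldl_map]
  apply PySem.List.foldl_congr_mem
  intro acc k _
  have h1 : ((k : Int) + 1) = ((k + 1 : Nat) : Int) := by push_cast; ring
  rw [h1, PySem.List.slice_from_natCast, PySem.List.slice_to_natCast]
  rw [show ((row0.drop (k+1)).foldl (· + ·) 0) = 0 + ((row0.drop (k+1)).map (fun x => x)).sum from
        PySem.List.foldl_add (g := fun x => x) (row0.drop (k+1)) 0,
      show ((row1.take k).foldl (· + ·) 0) = 0 + ((row1.take k).map (fun x => x)).sum from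
        PySem.List.foldl_add (g := fun x => x) (row1.take k) 0]
  simp [pvOMin]

-- ===== VERDICT (by name: the statement is the Claim_ definition above) =====
theorem solution_1378_3_spec : Claim_equal_solution_1378_3 := by
  intro grid _ _
  unfold Spec_solution_1378_3 solution_1378_3 solution_1378_3_alt
  set row0 := (PySem.List.pyGet? grid 0).getD [] with hrow0
  set row1 := (PySem.List.pyGet? grid 1).getD [] with hrow1
  simp only
  rw [pvA_eq row0 row1]
  have hB := pvB_inv row1 row0 0 (row0.foldl (· + ·) 0) 0 none
  simp only [Nat.cast_zero] at hB
  rw [hB]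
  congr 1
  apply PySem.List.foldl_congr_mem
  intro acc j _
  congr 2
  · have hsum : (row0.foldl (· + ·) 0) = row0.sum := by
      rw [show (row0.foldl (· + ·) 0) = 0 + (row0.map (fun x => x)).sum from
            PySem.List.foldl_add (g := fun x => x) row0 0]
      simp
    rw [hsum]
    have := List.sum_take_add_sum_drop row0 (j+1)
    omega
  · simp
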